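-- pv_equiv track=rewrite | github.com/tmblog/mpro | py/database.py | format_table_display
-- ===== SOURCE A (Python) =====
-- def format_table_display(tables):
--     """
--     Format tables for display. Groups by room and creates ranges.
--
--     Input: [{'room_label': 'Main', 'table_number': '1'}, ...]
--     Output: "Main 1-3, Patio 5, 7"
--     """
--     if not tables:
--         return ""
--
--     # Group by room
--     by_room = {}
--     for t in tables:
--         room = t.get('room_label', '') or 'Other'
--         if room not in by_room:
--             by_room[room] = []
--         by_room[room].append(t.get('table_number'))
--
--     parts = []
--     for room, numbers in by_room.items():
--         # Try to convert to integers for sorting/ranging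
--         try:
--             nums = sorted([int(n) for n in numbers])
--             formatted = format_number_ranges(nums)
--         except (ValueError, TypeError):
--             # Non-numeric table numbers
--             formatted = ', '.join(sorted(numbers))
--
--         if room and room != 'Other':
--             parts.append(f"{room} {formatted}")
--         else:
--             parts.append(formatted)
--
--     return ', '.join(parts)
--
-- def format_number_ranges(numbers):
--     """
--     Convert list of numbers to range string.
--     [1, 2, 3, 5, 7, 8] -> "1-3, 5, 7-8"
--     """
--     if not numbers:
--         return ""
--
--     numbers = sorted(set(numbers))
--     ranges = []
--     start = numbers[0]
--     end = numbers[0]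
--
--     for num in numbers[1:]:
--         if num == end + 1:
--             end = num
--         else:
--             if start == end:
--                 ranges.append(str(start))
--             else:
--                 ranges.append(f"{start}-{end}")
--             start = end = num
--
--     # Don't forget the last range
--     if start == end:
--         ranges.append(str(start))
--     else:
--         ranges.append(f"{start}-{end}")
--
--     return ', '.join(ranges)
-- ===== SOURCE B (Python) =====
-- def format_table_display(tables):
--     """Same display string as A; the range core groups consecutive runs by the
--     value-minus-index key instead of a start/end scan."""
--     by_room = {}
--     for t in tables:
--         room = t.get('room_label', '') or 'Other'
--         by_room.setdefault(room, []).append(t.get('table_number'))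
--
--     parts = []
--     for room, numbers in by_room.items():
--         try:
--             nums = sorted(set(int(n) for n in numbers))
--             runs = {}
--             for i, v in enumerate(nums):
--                 runs.setdefault(v - i, []).append(v)
--             formatted = ', '.join(
--                 str(g[0]) if g[0] == g[-1] else f"{g[0]}-{g[-1]}"
--                 for g in runs.values())
--         except (ValueError, TypeError):
--             formatted = ', '.join(sorted(numbers))
--         parts.append(f"{room} {formatted}" if room and room != 'Other' else formatted)
--     return ', '.join(parts)
-- ===== Notes on version B (the rewrite author's own statement) =====
-- stated objective: alternative
-- what changed: The range-building core is a different algorithm: instead of A's sequential start/end scan that flushes a range at each break, B sorts-and-dedups once and groups the numbers into maximal consecutive runs with a dict keyed by value-minus-index (the groupby trick), formatting each run from its first and last element; the room grouping uses setdefault instead of the membership-test-then-insert pattern.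
import Mathlib
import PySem

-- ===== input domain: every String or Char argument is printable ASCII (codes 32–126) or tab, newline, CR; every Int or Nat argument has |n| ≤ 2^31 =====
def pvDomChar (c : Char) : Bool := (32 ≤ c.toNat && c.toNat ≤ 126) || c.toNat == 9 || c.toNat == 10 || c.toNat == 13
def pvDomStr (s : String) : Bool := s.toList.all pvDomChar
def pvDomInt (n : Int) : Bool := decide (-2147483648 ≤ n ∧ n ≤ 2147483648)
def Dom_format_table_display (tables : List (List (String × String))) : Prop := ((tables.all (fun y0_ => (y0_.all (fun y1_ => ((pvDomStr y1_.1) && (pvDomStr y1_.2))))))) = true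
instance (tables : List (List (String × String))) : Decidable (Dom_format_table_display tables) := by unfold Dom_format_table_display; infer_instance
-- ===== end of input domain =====

-- One line: B rebuilds the range core by grouping maximal consecutive runs with a
-- value-minus-index keyed dict (groupby trick) instead of A's start/end scan; same output.

-- ===== PORT A =====
-- helper format_number_ranges: strings are built as List Char (PySem.Chars), assembled at the end
def format_number_ranges (numbers : List Int) : List Char :=
  if numbers = [] then []
  else
    -- numbers = sorted(set(numbers)); numbers[0] / numbers[1:] via the match (nonempty here)
    match PySem.List.sorted (PySem.Set.ofList numbers) (fun n => n) with
    | [] => []  -- unreachable: sorted set of a nonempty list is nonempty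
    | n0 :: rest =>
      -- state = (start, end, ranges); the loop over numbers[1:]
      let r := rest.foldl (fun (acc : Int × Int × List (List Char)) num =>
          if num = acc.2.1 + 1 then (acc.1, num, acc.2.2)
          else (num, num, acc.2.2 ++
            [if acc.1 = acc.2.1 then PySem.Int.toChars acc.1
             else PySem.Int.toChars acc.1 ++ '-' :: PySem.Int.toChars acc.2.1]))
        (n0, n0, [])
      PySem.Chars.join [',', ' ']
        (r.2.2 ++ [if r.1 = r.2.1 then PySem.Int.toChars r.1
                   else PySem.Int.toChars r.1 ++ '-' :: PySem.Int.toChars r.2.1])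

def format_table_display (tables : List (List (String × String))) : String :=
  if tables = [] then ""
  else
    let by_room : PySem.Dict String (List String) :=
      tables.foldl (fun d t =>
        let r := (PySem.Dict.mk t).getD "room_label" ""
        let room := if r = "" then "Other" else r
        let d' := if d.contains room then d else d.insert room []
        d'.modify room [] (· ++ [(PySem.Dict.mk t).getD "table_number" ""]))
        PySem.Dict.empty
    let parts := by_room.items.foldl (fun (ps : List (List Char)) p =>
        let room := p.1
        let ints := p.2.map PySem.Int.ofStr?
        let formatted :=
          if none ∈ ints then  -- int() raised ValueError on some table number
            PySem.Chars.join [',', ' ']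
              ((PySem.List.sorted p.2 (fun s => s)).map String.toList)
          else
            format_number_ranges (PySem.List.sorted ints.reduceOption (fun n => n))
        if room ≠ "" ∧ room ≠ "Other" then ps ++ [room.toList ++ ' ' :: formatted]
        else ps ++ [formatted]) []
    String.ofList (PySem.Chars.join [',', ' '] parts)

-- ===== PORT B =====
def format_table_display_alt (tables : List (List (String × String))) : String :=
  let by_room : PySem.Dict String (List String) :=
    tables.foldl (fun d t =>
      let r := (PySem.Dict.mk t).getD "room_label" ""
      let room := if r = "" then "Other" else r
      (d.setdefault room []).modify room [] (· ++ [(PySem.Dict.mk t).getD "table_number" ""]))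
      PySem.Dict.empty
  let parts := by_room.items.foldl (fun (ps : List (List Char)) p =>
      let room := p.1
      let ints := p.2.map PySem.Int.ofStr?
      let formatted :=
        if none ∈ ints then  -- int() raised ValueError on some table number
          PySem.Chars.join [',', ' ']
            ((PySem.List.sorted p.2 (fun s => s)).map String.toList)
        else
          -- nums = sorted(set(..)); runs = {}; runs.setdefault(v - i, []).append(v)
          let nums := PySem.List.sorted (PySem.Set.ofList ints.reduceOption) (fun n => n)
          let runs : PySem.Dict Int (List Int) :=
            (PySem.List.enumerate nums 0).foldl
              (fun d q => d.modify (q.2 - q.1) [] (· ++ [q.2])) PySem.Dict.empty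
          PySem.Chars.join [',', ' ']
            (runs.values.map (fun g =>
              if PySem.List.pyGetD g 0 0 = PySem.List.pyGetD g (-1) 0
              then PySem.Int.toChars (PySem.List.pyGetD g 0 0)
              else PySem.Int.toChars (PySem.List.pyGetD g 0 0) ++
                   '-' :: PySem.Int.toChars (PySem.List.pyGetD g (-1) 0)))
      if room ≠ "" ∧ room ≠ "Other" then ps ++ [room.toList ++ ' ' :: formatted]
      else ps ++ [formatted]) []
  String.ofList (PySem.Chars.join [',', ' '] parts)

-- ===== PRECONDITION & SPEC =====
-- Pre_ excludes (a) tables whose dict lacks the 'table_number' key — there Python A (and B)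
-- raises TypeError joining/sorting None — and (b) association lists with duplicate keys,
-- which no Python dict input corresponds to (a dict keeps the last value per key while an
-- association-list lookup takes the first match).
def Pre_format_table_display (tables : List (List (String × String))) : Prop :=
  ∀ t ∈ tables, (t.map Prod.fst).Nodup ∧ "table_number" ∈ t.map Prod.fst
instance (tables : List (List (String × String))) : Decidable (Pre_format_table_display tables) := by
  unfold Pre_format_table_display; infer_instance

def pvWitness_format_table_display : (List (List (String × String))) :=
  [[("room_label", "Main"), ("table_number", "1")], [("table_number", "3")]]

def Spec_format_table_display (tables : List (List (String × String))) (out : String) : Prop := out = format_table_display_alt tables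
instance (tables : List (List (String × String))) (out : String) : Decidable (Spec_format_table_display tables out) := by unfold Spec_format_table_display; infer_instance

-- ===== CLAIM (what is proved, stated in full; the proofs are below) =====
def Claim_equal_format_table_display : Prop := ∀ (tables : List (List (String × String))), Dom_format_table_display tables → Pre_format_table_display tables → Spec_format_table_display tables (format_table_display tables)

-- ===== LEMMAS AND PROOFS =====

-- proof-side vocabulary ---------------------------------------------------

/-- the range text "a" or "a-b" -/
def fmtR (a b : Int) : List Char :=
  if a = b then PySem.Int.toChars a else PySem.Int.toChars a ++ '-' :: PySem.Int.toChars b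

/-- B's per-group formatter (literally the lambda in the port) -/
def fmtG (g : List Int) : List Char :=
  if PySem.List.pyGetD g 0 0 = PySem.List.pyGetD g (-1) 0
  then PySem.Int.toChars (PySem.List.pyGetD g 0 0)
  else PySem.Int.toChars (PySem.List.pyGetD g 0 0) ++
       '-' :: PySem.Int.toChars (PySem.List.pyGetD g (-1) 0)

/-- maximal consecutive run starting at expected value e -/
def takeRun : Int → List Int → List Int
  | _, [] => []
  | e, y :: ys => if y = e then y :: takeRun (e + 1) ys else []

def dropRun : Int → List Int → List Int
  | _, [] => []
  | e, y :: ys => if y = e then dropRun (e + 1) ys else y :: ys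

theorem dropRun_length_le : ∀ (e : Int) (xs : List Int), (dropRun e xs).length ≤ xs.length := by
  intro e xs
  induction xs generalizing e with
  | nil => simp [dropRun]
  | cons y ys ih =>
    simp only [dropRun]
    split
    · exact Nat.le_succ_of_le (ih _)
    · simp

/-- the list of maximal consecutive runs -/
def gB : List Int → List (List Int)
  | [] => []
  | x :: xs => (x :: takeRun (x + 1) xs) :: gB (dropRun (x + 1) xs)
termination_by s => s.length
decreasing_by exact Nat.lt_succ_of_le (dropRun_length_le _ _)

/-- A's loop as structural recursion -/
def goA : Int → Int → List Int → List (List Char)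
  | st, e, [] => [fmtR st e]
  | st, e, y :: ys => if y = e + 1 then goA st y ys else fmtR st e :: goA y y ys

/-- (key, value) pairs with key = value minus index -/
def pvEnum (s : List Int) (n : Int) : List (Int × Int) :=
  (PySem.List.enumerate s n).map (fun q => (q.2 - q.1, q.2))

-- basic facts -------------------------------------------------------------

theorem pvEnum_nil (n : Int) : pvEnum [] n = [] := rfl

theorem pvEnum_cons (x : Int) (xs : List Int) (n : Int) :
    pvEnum (x :: xs) n = (x - n, x) :: pvEnum xs (n + 1) := by
  simp [pvEnum, PySem.List.enumerate_cons]

theorem takeRun_append_dropRun : ∀ (e : Int) (xs : List Int), takeRun e xs ++ dropRun e xs = xs := by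
  intro e xs
  induction xs generalizing e with
  | nil => simp [takeRun, dropRun]
  | cons y ys ih =>
    simp only [takeRun, dropRun]
    split
    · simp [ih]
    · simp

theorem dropRun_head : ∀ (xs : List Int) (e z : Int) (zs : List Int),
    dropRun e xs = z :: zs → z ≠ e + (takeRun e xs).length := by
  intro xs
  induction xs with
  | nil => intro e z zs h; simp [dropRun] at h
  | cons y ys ih =>
    intro e z zs h
    rcases eq_or_ne y e with hy | hy
    · subst hy
      rw [dropRun, if_pos rfl] at h
      have := ih (y + 1) z zs h
      rw [takeRun, if_pos rfl, List.length_cons]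
      intro hc
      apply this
      push_cast at hc ⊢
      omega
    · rw [dropRun, if_neg hy] at h
      cases h
      rw [takeRun, if_neg hy, List.length_nil]
      simpa using hy

theorem grow : ∀ (xs : List Int) (x : Int), (x :: xs).Pairwise (· < ·) →
    ∀ (j : Nat) (hj : j < xs.length), x + j < xs[j] := by
  intro xs
  induction xs with
  | nil => intro x _ j hj; simp at hj
  | cons y ys ih =>
    intro x hp j hj
    have hxy : x < y := (List.pairwise_cons.1 hp).1 y (by simp)
    have hp' : (y :: ys).Pairwise (· < ·) := (List.pairwise_cons.1 hp).2
    cases j with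
    | zero => simpa using hxy
    | succ j =>
      have := ih y hp' j (by simpa using hj)
      simp only [List.getElem_cons_succ]
      push_cast
      omega

-- takeWhile / dropWhile on pvEnum are takeRun / dropRun -------------------

theorem tw_dw : ∀ (xs : List Int) (n e k0 : Int), k0 = e - n →
    (pvEnum xs n).takeWhile (fun p => p.1 == k0) = pvEnum (takeRun e xs) n ∧
    (pvEnum xs n).dropWhile (fun p => p.1 == k0) =
      pvEnum (dropRun e xs) (n + (takeRun e xs).length) := by
  intro xs
  induction xs with
  | nil => intro n e k0 hk; simp [pvEnum_nil, takeRun, dropRun]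
  | cons y ys ih =>
    intro n e k0 hk
    rcases eq_or_ne y e with hy | hy
    · subst hy
      have hcond : ((y - n : Int) == k0) = true := by rw [beq_iff_eq]; omega
      have hih := ih (n + 1) (y + 1) k0 (by omega)
      have ht : takeRun y (y :: ys) = y :: takeRun (y + 1) ys := by rw [takeRun, if_pos rfl]
      have hd : dropRun y (y :: ys) = dropRun (y + 1) ys := by rw [dropRun, if_pos rfl]
      constructor
      · rw [pvEnum_cons]
        simp only [List.takeWhile_cons, hcond, if_true]
        rw [ht, pvEnum_cons, hih.1]
      · rw [pvEnum_cons]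
        simp only [List.dropWhile_cons, hcond, if_true]
        rw [hd, ht, hih.2, List.length_cons]
        congr 1
        push_cast
        omega
    · have hcond : ((y - n : Int) == k0) = false := by
        rw [beq_eq_false_iff_ne]; omega
      have ht : takeRun e (y :: ys) = [] := by rw [takeRun, if_neg hy]
      have hd : dropRun e (y :: ys) = y :: ys := by rw [dropRun, if_neg hy]
      constructor
      · rw [pvEnum_cons]
        simp only [List.takeWhile_cons, hcond, Bool.false_eq_true, if_false]
        rw [ht, pvEnum_nil]
      · rw [pvEnum_cons]
        simp only [List.dropWhile_cons, hcond, Bool.false_eq_true, if_false]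
        rw [ht, hd, pvEnum_cons, List.length_nil]
        norm_num

theorem takeRun_keys : ∀ (xs : List Int) (n e k0 : Int), k0 = e - n →
    ∀ p ∈ pvEnum (takeRun e xs) n, p.1 = k0 := by
  intro xs
  induction xs with
  | nil => intro n e k0 hk p hp; simp [takeRun, pvEnum_nil] at hp
  | cons y ys ih =>
    intro n e k0 hk p hp
    rcases eq_or_ne y e with hy | hy
    · subst hy
      rw [takeRun, if_pos rfl, pvEnum_cons, List.mem_cons] at hp
      rcases hp with hp | hp
      · subst hp; simp; omega
      · exact ih (n + 1) (y + 1) k0 (by omega) p hp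
    · rw [takeRun, if_neg hy] at hp; simp [pvEnum_nil] at hp

theorem mem_pvEnum (l : List Int) (m : Int) (p : Int × Int) :
    p ∈ pvEnum l m ↔ ∃ j, ∃ _ : j < l.length, p = (l[j] - (m + j), l[j]) := by
  simp only [pvEnum, List.mem_map, PySem.List.mem_enumerate_iff]
  constructor
  · rintro ⟨q, ⟨j, hj, rfl⟩, rfl⟩
    exact ⟨j, hj, by simp⟩
  · rintro ⟨j, hj, rfl⟩
    exact ⟨(m + j, l[j]), ⟨j, hj, rfl⟩, by simp⟩

theorem map_snd_pvEnum (l : List Int) (m : Int) : (pvEnum l m).map (fun p => p.2) = l := by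
  simp only [pvEnum, List.map_map, Function.comp_def]
  simp

theorem dropRun_keys_gt : ∀ (xs : List Int) (x n : Int), (x :: xs).Pairwise (· < ·) →
    ∀ p ∈ pvEnum (dropRun (x + 1) xs) ((n + 1) + (takeRun (x + 1) xs).length), x - n < p.1 := by
  intro xs x n hp p hmem
  rcases hT : dropRun (x + 1) xs with _ | ⟨z, zs⟩
  · rw [hT] at hmem; simp [pvEnum_nil] at hmem
  · rw [hT] at hmem
    have hsplit : takeRun (x + 1) xs ++ z :: zs = xs := by
      rw [← hT]; exact takeRun_append_dropRun _ _
    set R := takeRun (x + 1) xs with hR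
    -- z = xs[R.length] and x + R.length < z
    have hlen : R.length < xs.length := by
      rw [← hsplit]; simp
    have hz? : xs[R.length]? = some z := by
      rw [← hsplit, List.getElem?_append_right (le_refl _)]
      simp
    have hz : xs[R.length]'hlen = z := by
      have h2 := hz?.symm.trans (List.getElem?_eq_getElem hlen)
      exact (Option.some_inj.mp h2).symm
    have hzgt : x + (R.length : Int) < z := by
      have := grow xs x hp R.length hlen
      rw [hz] at this; exact this
    have hzne := dropRun_head xs (x + 1) z zs hT
    rw [← hR] at hzne
    have hz2 : x + (R.length : Int) + 2 ≤ z := by omega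
    -- pairwise of z :: zs
    have hzzs : (z :: zs).Pairwise (· < ·) := by
      refine List.Pairwise.sublist ?_ hp
      refine List.Sublist.trans ?_ (List.sublist_cons_self x xs)
      rw [← hsplit]; exact List.sublist_append_right _ _
    rw [mem_pvEnum] at hmem
    obtain ⟨j, hj, rfl⟩ := hmem
    cases j with
    | zero => simp only [List.getElem_cons_zero]; push_cast; omega
    | succ j =>
      have hg := grow zs z hzzs j (by simpa using hj)
      simp only [List.getElem_cons_succ]
      push_cast at hg ⊢
      omega

-- the Set.ofList collapse -------------------------------------------------

theorem discard_not_mem {s : PySem.Set Int} {k : Int} (h : k ∉ s) : PySem.Set.discard s k = s := by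
  unfold PySem.Set.discard
  simp only [List.filter_eq_self, Bool.not_eq_eq_eq_not, Bool.not_true, beq_eq_false_iff_ne, ne_eq]
  intro a ha hak
  exact h (hak ▸ ha)

theorem discard_cons_self (X : List Int) (k0 : Int) :
    PySem.Set.discard (k0 :: X) k0 = PySem.Set.discard X k0 := by
  unfold PySem.Set.discard
  simp

theorem collapse_aux (Tk : List Int) (k0 : Int) (hT : k0 ∉ Tk) :
    ∀ Rk : List Int, (∀ k ∈ Rk, k = k0) →
      PySem.Set.discard (PySem.Set.ofList (Rk ++ Tk)) k0 = PySem.Set.ofList Tk := by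
  intro Rk
  induction Rk with
  | nil =>
    intro _
    simp only [List.nil_append]
    exact discard_not_mem (by rw [PySem.Set.mem_ofList]; exact hT)
  | cons r Rk' ih =>
    intro hR
    have hr : r = k0 := hR r (by simp)
    subst hr
    rw [List.cons_append, PySem.Set.ofList_cons]
    rw [discard_cons_self]
    have hd := ih (fun k hk => hR k (by simp [hk]))
    calc PySem.Set.discard (PySem.Set.discard (PySem.Set.ofList (Rk' ++ Tk)) r) r
        = PySem.Set.discard (PySem.Set.ofList Tk) r := by rw [hd]
      _ = PySem.Set.ofList Tk := discard_not_mem (by rw [PySem.Set.mem_ofList]; exact hT)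

theorem ofList_run_collapse (Rk Tk : List Int) (k0 : Int)
    (hR : ∀ k ∈ Rk, k = k0) (hT : k0 ∉ Tk) :
    PySem.Set.ofList (k0 :: (Rk ++ Tk)) = k0 :: PySem.Set.ofList Tk := by
  rw [PySem.Set.ofList_cons, collapse_aux Tk k0 hT Rk hR]

-- C1: the dict grouping is the run decomposition --------------------------

theorem groups_eq_gB : ∀ (N : Nat) (s : List Int) (n : Int), s.length ≤ N →
    s.Pairwise (· < ·) →
    (PySem.Set.ofList ((pvEnum s n).map Prod.fst)).map
      (fun k => ((pvEnum s n).filter (fun p => p.1 == k)).map (fun p => p.2)) = gB s := by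
  intro N
  induction N with
  | zero =>
    intro s n hlen _
    have hs : s = [] := List.eq_nil_of_length_eq_zero (Nat.le_zero.mp hlen)
    subst hs
    simp [pvEnum_nil, gB, PySem.Set.ofList]
  | succ N ih =>
    intro s n hlen hp
    cases s with
    | nil => simp [pvEnum_nil, gB, PySem.Set.ofList]
    | cons x xs =>
      have hxs : xs.Pairwise (· < ·) := (List.pairwise_cons.1 hp).2
      have htw := tw_dw xs (n + 1) (x + 1) (x - n) (by omega)
      have hsplit : pvEnum xs (n + 1) =
          pvEnum (takeRun (x + 1) xs) (n + 1) ++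
          pvEnum (dropRun (x + 1) xs) ((n + 1) + (takeRun (x + 1) xs).length) := by
        conv_lhs => rw [← List.takeWhile_append_dropWhile
          (p := fun p => p.1 == x - n) (l := pvEnum xs (n + 1))]
        rw [htw.1, htw.2]
      set R := takeRun (x + 1) xs with hR
      set T := dropRun (x + 1) xs with hTd
      set m := ((n + 1) + (R.length : Int)) with hm
      have hkeys : (pvEnum (x :: xs) n).map Prod.fst =
          (x - n) :: ((pvEnum R (n + 1)).map Prod.fst ++ (pvEnum T m).map Prod.fst) := by
        rw [pvEnum_cons, List.map_cons, hsplit, List.map_append]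
      have hRk : ∀ k ∈ (pvEnum R (n + 1)).map Prod.fst, k = x - n := by
        intro k hk
        obtain ⟨p, hpmem, rfl⟩ := List.mem_map.1 hk
        exact takeRun_keys xs (n + 1) (x + 1) (x - n) (by omega) p hpmem
      have hTk : ∀ k ∈ (pvEnum T m).map Prod.fst, x - n < k := by
        intro k hk
        obtain ⟨p, hpmem, rfl⟩ := List.mem_map.1 hk
        exact dropRun_keys_gt xs x n hp p hpmem
      have hTk0 : (x - n) ∉ (pvEnum T m).map Prod.fst := fun hc => absurd (hTk _ hc) (by omega)
      rw [hkeys, ofList_run_collapse _ _ _ hRk hTk0, List.map_cons]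
      have hfilter0 : ((pvEnum (x :: xs) n).filter (fun p => p.1 == x - n)).map (fun p => p.2)
          = x :: R := by
        rw [pvEnum_cons, hsplit, List.filter_cons, List.filter_append]
        have h1 : (pvEnum R (n + 1)).filter (fun p => p.1 == x - n) = pvEnum R (n + 1) :=
          List.filter_eq_self.2 (fun p hp' => by
            rw [beq_iff_eq]
            exact takeRun_keys xs (n + 1) (x + 1) (x - n) (by omega) p hp')
        have h2 : (pvEnum T m).filter (fun p => p.1 == x - n) = [] :=
          List.filter_eq_nil_iff.2 (fun p hp' => by
            have := dropRun_keys_gt xs x n hp p hp'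
            simp only [beq_iff_eq]
            omega)
        simp only [h1, h2, List.append_nil, beq_self_eq_true, if_pos, List.map_cons,
          map_snd_pvEnum]
      have hT_sub : T.Sublist xs := by
        conv_rhs => rw [← takeRun_append_dropRun (x + 1) xs]
        exact List.sublist_append_right _ _
      have hT_t : T.Pairwise (· < ·) := List.Pairwise.sublist hT_sub hxs
      have hTlen : T.length ≤ N := by
        have h1 := dropRun_length_le (x + 1) xs
        rw [← hTd] at h1
        simp only [List.length_cons] at hlen
        omega
      have hrest : ∀ k ∈ PySem.Set.ofList ((pvEnum T m).map Prod.fst),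
          ((pvEnum (x :: xs) n).filter (fun p => p.1 == k)).map (fun p => p.2) =
          ((pvEnum T m).filter (fun p => p.1 == k)).map (fun p => p.2) := by
        intro k hk
        rw [PySem.Set.mem_ofList] at hk
        have hkgt := hTk k hk
        rw [pvEnum_cons, hsplit, List.filter_cons, List.filter_append]
        have h0 : ((x - n, x).1 == k) = false := by
          rw [beq_eq_false_iff_ne]; simp only [ne_eq]; omega
        have h1 : (pvEnum R (n + 1)).filter (fun p => p.1 == k) = [] :=
          List.filter_eq_nil_iff.2 (fun p hp' => by
            have := takeRun_keys xs (n + 1) (x + 1) (x - n) (by omega) p hp'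
            simp only [beq_iff_eq]
            omega)
        simp [h0, h1]
      rw [List.map_congr_left hrest, ih T m hTlen hT_t, gB, ← hR, ← hTd]
      congr 1

-- C2: A's loop equals the formatted run decomposition ---------------------

theorem fmtG_cons (y : Int) (t : List Int) : fmtG (y :: t) = fmtR y (t.getLastD y) := by
  unfold fmtG fmtR
  rw [PySem.List.pyGetD_zero_cons, PySem.List.pyGetD_neg_one _ _ (by simp),
    List.getLast_eq_getLastD]

theorem goA_eq : ∀ (l : List Int) (st e : Int),
    goA st e l = fmtR st ((takeRun (e + 1) l).getLastD e) :: (gB (dropRun (e + 1) l)).map fmtG := by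
  intro l
  induction l with
  | nil => intro st e; simp [goA, takeRun, dropRun, gB]
  | cons y ys ih =>
    intro st e
    rcases eq_or_ne y (e + 1) with hy | hy
    · subst hy
      rw [goA, if_pos rfl, takeRun, if_pos rfl, dropRun, if_pos rfl, List.getLastD_cons]
      exact ih st (e + 1)
    · rw [goA, if_neg hy]
      rw [takeRun, if_neg hy, dropRun, if_neg hy, List.getLastD_nil]
      rw [gB, List.map_cons, fmtG_cons, ih y y]

def stepA (acc : Int × Int × List (List Char)) (num : Int) : Int × Int × List (List Char) :=
  if num = acc.2.1 + 1 then (acc.1, num, acc.2.2)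
  else (num, num, acc.2.2 ++
    [if acc.1 = acc.2.1 then PySem.Int.toChars acc.1
     else PySem.Int.toChars acc.1 ++ '-' :: PySem.Int.toChars acc.2.1])

def outA (r : Int × Int × List (List Char)) : List (List Char) :=
  r.2.2 ++ [if r.1 = r.2.1 then PySem.Int.toChars r.1
            else PySem.Int.toChars r.1 ++ '-' :: PySem.Int.toChars r.2.1]

theorem A_loop : ∀ (l : List Int) (st e : Int) (acc : List (List Char)),
    outA (l.foldl stepA (st, e, acc)) = acc ++ goA st e l := by
  intro l
  induction l with
  | nil => intro st e acc; simp [outA, goA, fmtR]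
  | cons y ys ih =>
    intro st e acc
    rw [List.foldl_cons]
    rcases eq_or_ne y (e + 1) with hy | hy
    · have hstep : stepA (st, e, acc) y = (st, y, acc) := by simp [stepA, hy]
      rw [hstep, goA, if_pos hy]
      exact ih st y acc
    · have hstep : stepA (st, e, acc) y =
          (y, y, acc ++ [if st = e then PySem.Int.toChars st
                         else PySem.Int.toChars st ++ '-' :: PySem.Int.toChars e]) := by
        simp [stepA, hy]
      rw [hstep, goA, if_neg hy, ih y y]
      simp [fmtR]

-- the sorted/set plumbing -------------------------------------------------

theorem sortedInt_pairwise_lt (l : List Int) :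
    (PySem.List.sorted (PySem.Set.ofList l) (fun n => n)).Pairwise (· < ·) := by
  have hle := PySem.List.sorted_pairwise (PySem.Set.ofList l) (fun n => n)
  have hperm := PySem.List.sorted_perm (PySem.Set.ofList l) (fun n => n) false
  have hnd : (PySem.List.sorted (PySem.Set.ofList l) (fun n => n)).Nodup :=
    hperm.nodup_iff.mpr (PySem.Set.nodup_ofList l)
  exact (hle.and hnd).imp (fun {a b} h => lt_of_le_of_ne h.1 h.2)

theorem sorted_ofList_sorted (l : List Int) :
    PySem.List.sorted (PySem.Set.ofList (PySem.List.sorted l (fun n => n))) (fun n => n) =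
    PySem.List.sorted (PySem.Set.ofList l) (fun n => n) := by
  apply PySem.List.sorted_eq_of_perm_of_pairwise_lt
  · have h1 : (PySem.List.sorted (PySem.Set.ofList l) (fun n => n)).Nodup :=
      (PySem.List.sorted_perm (PySem.Set.ofList l) (fun n => n) false).nodup_iff.mpr
        (PySem.Set.nodup_ofList l)
    have h2 : (PySem.Set.ofList (PySem.List.sorted l (fun n => n))).Nodup :=
      PySem.Set.nodup_ofList _
    rw [List.perm_ext_iff_of_nodup h1 h2]
    intro a
    rw [PySem.Set.mem_ofList]
    rw [(PySem.List.sorted_perm (PySem.Set.ofList l) (fun n => n) false).mem_iff]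
    rw [(PySem.List.sorted_perm l (fun n => n) false).mem_iff]
    rw [PySem.Set.mem_ofList]
  · exact sortedInt_pairwise_lt l

-- KEY: per-room equality of the two range cores ---------------------------

theorem key_core (l : List Int) :
    format_number_ranges (PySem.List.sorted l (fun n => n)) =
      PySem.Chars.join [',', ' ']
        ((((PySem.List.enumerate (PySem.List.sorted (PySem.Set.ofList l) (fun n => n)) 0).foldl
            (fun d q => d.modify (q.2 - q.1) [] (· ++ [q.2])) PySem.Dict.empty).values).map
          (fun g =>
            if PySem.List.pyGetD g 0 0 = PySem.List.pyGetD g (-1) 0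
            then PySem.Int.toChars (PySem.List.pyGetD g 0 0)
            else PySem.Int.toChars (PySem.List.pyGetD g 0 0) ++
                 '-' :: PySem.Int.toChars (PySem.List.pyGetD g (-1) 0))) := by
  rw [show (fun g =>
      if PySem.List.pyGetD g 0 0 = PySem.List.pyGetD g (-1) 0
      then PySem.Int.toChars (PySem.List.pyGetD g 0 0)
      else PySem.Int.toChars (PySem.List.pyGetD g 0 0) ++
           '-' :: PySem.Int.toChars (PySem.List.pyGetD g (-1) 0)) = fmtG from rfl]
  by_cases hl : l = []
  · subst hl; decide
  · have hperm0 := PySem.List.sorted_perm l (fun n => n) false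
    have hs0 : PySem.List.sorted l (fun n => n) ≠ [] := by
      intro hc
      rw [hc] at hperm0
      exact hl hperm0.symm.eq_nil
    have hsp : (PySem.List.sorted (PySem.Set.ofList l) (fun n => n)).Pairwise (· < ·) :=
      sortedInt_pairwise_lt l
    obtain ⟨n0, rest, hs⟩ : ∃ n0 rest,
        PySem.List.sorted (PySem.Set.ofList l) (fun n => n) = n0 :: rest := by
      cases hsc : PySem.List.sorted (PySem.Set.ofList l) (fun n => n) with
      | nil =>
        exfalso
        have hperm := PySem.List.sorted_perm (PySem.Set.ofList l) (fun n => n) false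
        rw [hsc] at hperm
        have hofl : PySem.Set.ofList l = [] := hperm.symm.eq_nil
        cases l with
        | nil => exact hl rfl
        | cons a l' =>
          have ha : a ∈ PySem.Set.ofList (a :: l') := by
            rw [PySem.Set.mem_ofList]; simp
          rw [hofl] at ha
          simp at ha
      | cons a b => exact ⟨a, b, rfl⟩
    have hL : format_number_ranges (PySem.List.sorted l (fun n => n)) =
        PySem.Chars.join [',', ' '] (outA (rest.foldl stepA (n0, n0, []))) := by
      unfold format_number_ranges
      rw [if_neg hs0, sorted_ofList_sorted l, hs]
      rfl
    rw [hL, hs]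
    rw [A_loop rest n0 n0 [], List.nil_append, goA_eq]
    have hD : (PySem.List.enumerate (n0 :: rest) 0).foldl
          (fun d q => d.modify (q.2 - q.1) [] (· ++ [q.2])) PySem.Dict.empty
        = (pvEnum (n0 :: rest) 0).foldl
          (fun d p => d.modify p.1 [] (· ++ [p.2])) PySem.Dict.empty := by
      rw [pvEnum, List.foldl_map]
    rw [hD]
    have hnodup : ((pvEnum (n0 :: rest) 0).foldl
        (fun d p => d.modify p.1 [] (· ++ [p.2])) PySem.Dict.empty).keys.Nodup := by
      apply PySem.Dict.nodup_keys_foldl_modify_key (key := Prod.fst)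
      rw [PySem.Dict.keys_empty]
      exact List.nodup_nil
    rw [PySem.Dict.values_eq_map_keys _ hnodup []]
    have hkeys : ((pvEnum (n0 :: rest) 0).foldl
        (fun d p => d.modify p.1 [] (· ++ [p.2])) PySem.Dict.empty).keys
        = PySem.Set.ofList ((pvEnum (n0 :: rest) 0).map Prod.fst) := by
      rw [PySem.Dict.keys_foldl_modify_key (key := Prod.fst), PySem.Dict.keys_empty,
        PySem.Set.update_nil_left]
    rw [hkeys]
    have hgetD : ∀ k ∈ PySem.Set.ofList ((pvEnum (n0 :: rest) 0).map Prod.fst),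
        ((pvEnum (n0 :: rest) 0).foldl
          (fun d p => d.modify p.1 [] (· ++ [p.2])) PySem.Dict.empty).getD k []
        = ((pvEnum (n0 :: rest) 0).filter (fun p => p.1 == k)).map (fun p => p.2) := by
      intro k _
      rw [PySem.Dict.getD_foldl_modify_append, PySem.Dict.getD_empty, List.nil_append]
    rw [List.map_congr_left hgetD]
    rw [groups_eq_gB (n0 :: rest).length (n0 :: rest) 0 le_rfl (hs ▸ hsp)]
    rw [gB, List.map_cons, fmtG_cons]

-- ===== VERDICT (by name: the statement is the Claim_ definition above) =====
theorem format_table_display_spec : Claim_equal_format_table_display := by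
  unfold Claim_equal_format_table_display
  intro tables _ _
  unfold Spec_format_table_display
  by_cases htab : tables = []
  · subst htab; decide
  · simp only [format_table_display, format_table_display_alt, if_neg htab]
    apply congrArg String.ofList
    apply congrArg (PySem.Chars.join [',', ' '])
    have hdict : tables.foldl (fun (d : PySem.Dict String (List String)) t =>
          (if d.contains (if (PySem.Dict.mk t).getD "room_label" "" = "" then "Other"
                          else (PySem.Dict.mk t).getD "room_label" "")
           then d
           else d.insert (if (PySem.Dict.mk t).getD "room_label" "" = "" then "Other"
                          else (PySem.Dict.mk t).getD "room_label" "") []).modify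
            (if (PySem.Dict.mk t).getD "room_label" "" = "" then "Other"
             else (PySem.Dict.mk t).getD "room_label" "") []
            (· ++ [(PySem.Dict.mk t).getD "table_number" ""])) PySem.Dict.empty
        = tables.foldl (fun (d : PySem.Dict String (List String)) t =>
          (d.setdefault (if (PySem.Dict.mk t).getD "room_label" "" = "" then "Other"
                         else (PySem.Dict.mk t).getD "room_label" "") []).modify
            (if (PySem.Dict.mk t).getD "room_label" "" = "" then "Other"
             else (PySem.Dict.mk t).getD "room_label" "") []
            (· ++ [(PySem.Dict.mk t).getD "table_number" ""])) PySem.Dict.empty := by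
      apply PySem.List.foldl_congr_mem
      intro acc t _
      by_cases hc : acc.contains (if (PySem.Dict.mk t).getD "room_label" "" = "" then "Other"
          else (PySem.Dict.mk t).getD "room_label" "") = true
      · rw [if_pos hc, PySem.Dict.setdefault_of_contains acc [] hc]
      · rw [if_neg hc, PySem.Dict.setdefault_of_not_contains acc [] (by simpa using hc)]
    rw [hdict]
    apply PySem.List.foldl_congr_mem
    intro acc p _
    have hfmt : (if none ∈ p.2.map PySem.Int.ofStr? then
          PySem.Chars.join [',', ' ']
            ((PySem.List.sorted p.2 (fun s => s)).map String.toList)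
        else
          format_number_ranges
            (PySem.List.sorted (p.2.map PySem.Int.ofStr?).reduceOption (fun n => n)))
        = (if none ∈ p.2.map PySem.Int.ofStr? then
          PySem.Chars.join [',', ' ']
            ((PySem.List.sorted p.2 (fun s => s)).map String.toList)
        else
          PySem.Chars.join [',', ' ']
            ((((PySem.List.enumerate
                (PySem.List.sorted
                  (PySem.Set.ofList (p.2.map PySem.Int.ofStr?).reduceOption) (fun n => n)) 0).foldl
                (fun d q => d.modify (q.2 - q.1) [] (· ++ [q.2])) PySem.Dict.empty).values).map
              (fun g =>
                if PySem.List.pyGetD g 0 0 = PySem.List.pyGetD g (-1) 0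
                then PySem.Int.toChars (PySem.List.pyGetD g 0 0)
                else PySem.Int.toChars (PySem.List.pyGetD g 0 0) ++
                     '-' :: PySem.Int.toChars (PySem.List.pyGetD g (-1) 0)))) := by
      by_cases h : none ∈ p.2.map PySem.Int.ofStr?
      · rw [if_pos h, if_pos h]
      · rw [if_neg h, if_neg h]
        exact key_core _
    rw [hfmt]
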